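-- pv_equiv track=rewrite | github.com/ahmyasser/Rule-Based-Programing | recency.py | append_to_pre
-- ===== SOURCE A (Python) =====
-- def append_to_pre(pre , rule):
--     output=False
--     remove=False
--     els = rule.split(" ")
--     for el in els:
--         if remove:
--             if el in pre:
--                 pre.remove(el)
--         else:
--             if output and not remove:
--                 if el == "remove":
--                     remove = True
--                 else:
--                     pre.append(el)
--             else:
--                 if el == "then":
--                     output=True
--
--
--     return pre
-- ===== SOURCE B (Python) =====
-- def append_to_pre(pre, rule):
--     els = rule.split(" ")
--     if "then" not in els:
--         return pre
--     tail = els[els.index("then") + 1:]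
--     j = tail.index("remove") if "remove" in tail else len(tail)
--     pre.extend(tail[:j])
--     for el in tail[j + 1:]:
--         if el in pre:
--             pre.remove(el)
--     return pre
-- ===== Notes on version B (the rewrite author's own statement) =====
-- stated objective: simpler
-- what changed: Replaced the two-flag one-pass state machine by explicit index searches: find the first 'then', split the remainder at the first 'remove', bulk-append the slice before it and delete the tokens after it.
import Mathlib
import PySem

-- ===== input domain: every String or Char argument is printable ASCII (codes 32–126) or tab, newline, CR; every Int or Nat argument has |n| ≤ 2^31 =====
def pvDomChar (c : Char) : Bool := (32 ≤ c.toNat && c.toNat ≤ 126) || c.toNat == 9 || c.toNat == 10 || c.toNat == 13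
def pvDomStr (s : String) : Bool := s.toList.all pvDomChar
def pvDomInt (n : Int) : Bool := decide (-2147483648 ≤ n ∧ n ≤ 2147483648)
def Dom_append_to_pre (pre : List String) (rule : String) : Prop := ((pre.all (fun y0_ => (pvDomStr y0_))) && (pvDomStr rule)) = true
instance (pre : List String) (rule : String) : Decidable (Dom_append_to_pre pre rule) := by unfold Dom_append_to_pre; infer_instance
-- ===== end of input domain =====

-- B replaces A's two-flag one-pass state machine by index searches and slices (simpler
-- decomposition, same cost); equivalence is about the RETURN value only — the Python A and B
-- both mutate `pre` in place in the same way.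

-- ===== PORT A =====
-- one step of A's loop; state = (output, remove, pre)
def appendStepA (st : Bool × Bool × List String) (el : String) : Bool × Bool × List String :=
  let output := st.1
  let remove := st.2.1
  let p := st.2.2
  if remove then
    (if el ∈ p then (output, remove, (PySem.List.remove? p el).getD p) else st)
  else
    if output && !remove then
      (if el == "remove" then (output, true, p) else (output, remove, p ++ [el]))
    else
      (if el == "then" then (true, remove, p) else st)

def append_to_pre (pre : List String) (rule : String) : List String :=
  let els := (PySem.Str.split? rule " ").getD []   -- sep " " ≠ "", so split? is some
  (els.foldl appendStepA (false, false, pre)).2.2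

-- ===== PORT B =====
-- B's removal loop: delete each el from p if present
def removeEach (p : List String) (els : List String) : List String :=
  els.foldl (fun p el => if el ∈ p then (PySem.List.remove? p el).getD p else p) p

def append_to_pre_alt (pre : List String) (rule : String) : List String :=
  let els := (PySem.Str.split? rule " ").getD []   -- sep " " ≠ "", so split? is some
  match PySem.List.index? els "then" with
  | none => pre
  | some i =>
    let tail := els.drop (i + 1)                   -- els[i+1:], i+1 ≥ 0
    let j := (PySem.List.index? tail "remove").getD tail.length
    removeEach (pre ++ tail.take j) (tail.drop (j + 1))

-- ===== PRECONDITION & SPEC =====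
def Spec_append_to_pre (pre : List String) (rule : String) (out : List String) : Prop := out = append_to_pre_alt pre rule
instance (pre : List String) (rule : String) (out : List String) : Decidable (Spec_append_to_pre pre rule out) := by unfold Spec_append_to_pre; infer_instance

-- ===== CLAIM (what is proved, stated in full; the proofs are below) =====
def Claim_equal_append_to_pre : Prop := ∀ (pre : List String) (rule : String), Dom_append_to_pre pre rule → Spec_append_to_pre pre rule (append_to_pre pre rule)

-- ===== LEMMAS AND PROOFS =====

-- skip phase: before any "then", A's loop leaves the state untouched
lemma foldA_skip (l : List String) (p : List String) (h : "then" ∉ l) :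
    l.foldl appendStepA (false, false, p) = (false, false, p) := by
  induction l with
  | nil => rfl
  | cons x xs ih =>
    simp only [List.mem_cons, not_or] at h
    simp only [List.foldl_cons]
    have hx : (x == "then") = false := by
      simp only [beq_eq_false_iff_ne]
      exact fun e => h.1 e.symm
    simp [appendStepA, hx]
    exact ih h.2

-- append phase: before any "remove", A's loop appends every token
lemma foldA_append (l : List String) (p : List String) (h : "remove" ∉ l) :
    l.foldl appendStepA (true, false, p) = (true, false, p ++ l) := by
  induction l generalizing p with
  | nil => simp
  | cons x xs ih =>
    simp only [List.mem_cons, not_or] at h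
    have hx : (x == "remove") = false := by
      simp only [beq_eq_false_iff_ne]
      exact fun e => h.1 e.symm
    simp only [List.foldl_cons]
    simp [appendStepA, hx]
    rw [ih (p ++ [x]) h.2]
    simp

-- remove phase: after "remove", A's loop is exactly B's removal loop
lemma foldA_remove (l : List String) (p : List String) :
    l.foldl appendStepA (true, true, p) = (true, true, removeEach p l) := by
  induction l generalizing p with
  | nil => rfl
  | cons x xs ih =>
    simp only [List.foldl_cons, removeEach, appendStepA]
    by_cases hx : x ∈ p <;> simp [hx, ih, removeEach]

lemma drop_len_succ {α : Type} (l : List α) (x : α) (t : List α) :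
    (l ++ x :: t).drop (l.length + 1) = t := by
  induction l with
  | nil => simp
  | cons y ys ih => simp [ih]

lemma take_len {α : Type} (l : List α) (t : List α) :
    (l ++ t).take l.length = l := by
  induction l with
  | nil => simp
  | cons y ys ih => simp [ih]

-- ===== VERDICT (by name: the statement is the Claim_ definition above) =====
theorem append_to_pre_spec : Claim_equal_append_to_pre := by
  intro pre rule _
  unfold Spec_append_to_pre append_to_pre append_to_pre_alt
  set els := (PySem.Str.split? rule " ").getD [] with hels
  dsimp only
  cases h : PySem.List.index? els "then" with
  | none =>
    have hnot : "then" ∉ els := (PySem.List.index?_eq_none_iff els "then").mp h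
    rw [foldA_skip els pre hnot]
  | some i =>
    obtain ⟨l, suf, hsplit, hlen, hnl⟩ := (PySem.List.index?_eq_some_iff els "then" i).mp h
    subst hlen
    simp only
    rw [hsplit, drop_len_succ l "then" suf]
    rw [List.foldl_append, foldA_skip l pre hnl]
    simp only [List.foldl_cons]
    have hthen : appendStepA (false, false, pre) "then" = (true, false, pre) := by
      simp [appendStepA]
    rw [hthen]
    cases h2 : PySem.List.index? suf "remove" with
    | none =>
      have hnr : "remove" ∉ suf := (PySem.List.index?_eq_none_iff suf "remove").mp h2
      rw [foldA_append suf pre hnr]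
      simp [removeEach, List.drop_eq_nil_of_le]
    | some j =>
      obtain ⟨m, t, hs2, hlen2, hnm⟩ := (PySem.List.index?_eq_some_iff suf "remove" j).mp h2
      subst hlen2
      simp only [Option.getD_some]
      rw [hs2, List.foldl_append, foldA_append m pre hnm]
      simp only [List.foldl_cons]
      have hrem : appendStepA (true, false, pre ++ m) "remove" = (true, true, pre ++ m) := by
        simp [appendStepA]
      rw [hrem, foldA_remove]
      rw [take_len m ("remove" :: t), drop_len_succ m "remove" t]
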